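-- pv_equiv track=rewrite | github.com/MrBrantCode/unitest_baseline | mut_generate/mist_train_cf/cf_20853/solution.py | convert_to_multidimensional
-- ===== SOURCE A (Python) =====
-- def convert_to_multidimensional(a):
--     multidimensional_list = []
--     for i in range(len(a)):
--         row = []
--         sum_previous = 0
--         for j in range(len(a)):
--             if j <= i:
--                 sum_previous += a[j]
--             row.append((a[i], i, sum_previous))
--         multidimensional_list.append(row)
--     return multidimensional_list
-- ===== SOURCE B (Python) =====
-- def convert_to_multidimensional(a):
--     prefix = []
--     s = 0
--     for x in a:
--         s += x
--         prefix.append(s)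
--     n = len(a)
--     return [[(a[i], i, prefix[min(i, j)]) for j in range(n)] for i in range(n)]
-- ===== Notes on version B (the rewrite author's own statement) =====
-- stated objective: simpler
-- what changed: B precomputes the prefix-sum array in one pass and builds entry (i,j) as (a[i], i, prefix[min(i,j)]) via a nested comprehension, removing A's per-row conditional re-accumulation of the running sum.
import Mathlib
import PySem

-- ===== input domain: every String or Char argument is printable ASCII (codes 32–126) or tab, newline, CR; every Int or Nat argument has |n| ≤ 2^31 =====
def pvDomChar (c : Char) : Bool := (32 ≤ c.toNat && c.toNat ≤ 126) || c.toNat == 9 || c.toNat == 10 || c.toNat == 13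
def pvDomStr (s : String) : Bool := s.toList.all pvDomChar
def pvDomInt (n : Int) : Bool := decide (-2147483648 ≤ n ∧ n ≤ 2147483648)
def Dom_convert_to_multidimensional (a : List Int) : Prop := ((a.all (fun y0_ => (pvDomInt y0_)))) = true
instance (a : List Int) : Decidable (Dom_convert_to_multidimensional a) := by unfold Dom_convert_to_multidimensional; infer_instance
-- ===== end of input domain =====

-- B replaces A's per-row conditional re-accumulation by a single prefix-sum pass and min(i,j) lookups (objective: simpler).

-- ===== PORT A =====
def convert_to_multidimensional (a : List Int) : List (List (Int × Int × Int)) :=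
  (PySem.List.pyRange 0 (a.length : Int) 1).foldl (fun ml i =>
    let inner := (PySem.List.pyRange 0 (a.length : Int) 1).foldl
      (fun (st : List (Int × Int × Int) × Int) j =>
        let s := if j ≤ i then st.2 + PySem.List.pyGetD a j 0 else st.2
        (st.1 ++ [(PySem.List.pyGetD a i 0, i, s)], s)) ([], 0)
    ml ++ [inner.1]) []

-- ===== PORT B =====
def convert_to_multidimensional_alt (a : List Int) : List (List (Int × Int × Int)) :=
  let pref := (a.foldl (fun (st : List Int × Int) x => (st.1 ++ [st.2 + x], st.2 + x)) ([], 0)).1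
  let n : Int := a.length
  (PySem.List.pyRange 0 n 1).map (fun i =>
    (PySem.List.pyRange 0 n 1).map (fun j =>
      (PySem.List.pyGetD a i 0, i, PySem.List.pyGetD pref (min i j) 0)))

-- ===== PRECONDITION & SPEC =====
def Spec_convert_to_multidimensional (a : List Int) (out : List (List (Int × Int × Int))) : Prop := out = convert_to_multidimensional_alt a
instance (a : List Int) (out : List (List (Int × Int × Int))) : Decidable (Spec_convert_to_multidimensional a out) := by unfold Spec_convert_to_multidimensional; infer_instance

-- ===== CLAIM (what is proved, stated in full; the proofs are below) =====
def Claim_equal_convert_to_multidimensional : Prop := ∀ (a : List Int), Dom_convert_to_multidimensional a → Spec_convert_to_multidimensional a (convert_to_multidimensional a)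

-- ===== LEMMAS AND PROOFS =====

-- B's prefix fold produces the list of partial sums.
theorem pv_prefix_fold_spec (a : List Int) (acc : List Int) (s : Int) :
    (a.foldl (fun (st : List Int × Int) x => (st.1 ++ [st.2 + x], st.2 + x)) (acc, s)).1
      = acc ++ (List.range a.length).map (fun k => s + (a.take (k+1)).sum) := by
  induction a generalizing acc s with
  | nil => simp
  | cons x t ih =>
      simp only [List.foldl_cons, ih, List.length_cons, List.range_succ_eq_map,
        List.map_cons, List.map_map]
      simp [Function.comp, add_assoc, List.append_assoc]

-- A's inner loop over range(0, m) equals, entrywise, the prefix sum taken at min(i,j);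
-- the running sum ends at the partial sum up to min(i+1, m).
theorem pv_inner_loop_spec (a : List Int) (i : Int) (m : Nat) (hm : m ≤ a.length) :
    ((PySem.List.pyRange 0 (m : Int) 1).foldl
        (fun (st : List (Int × Int × Int) × Int) j =>
          let s := if j ≤ i then st.2 + PySem.List.pyGetD a j 0 else st.2
          (st.1 ++ [(PySem.List.pyGetD a i 0, i, s)], s)) ([], 0))
      = ((PySem.List.pyRange 0 (m : Int) 1).map
          (fun j => (PySem.List.pyGetD a i 0, i, (a.take (min (i+1) (j+1)).toNat).sum)),
         (a.take (min (i+1) (m : Int)).toNat).sum) := by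
  induction m with
  | zero =>
      have h0 : (min (i+1) (0:Int)).toNat = 0 := by omega
      simp [PySem.List.pyRange_one_eq_nil, h0]
  | succ m ih =>
      have hm' : m ≤ a.length := Nat.le_of_succ_le hm
      have hlt : m < a.length := hm
      have hcast : ((m + 1 : Nat) : Int) = (m : Int) + 1 := by push_cast; ring
      rw [hcast, PySem.List.pyRange_one_succ_right (by positivity),
        List.foldl_append, List.map_append, ih hm']
      have hget : PySem.List.pyGetD a (m : Int) 0 = a[m] := by
        rw [PySem.List.pyGetD_natCast]; exact List.getD_eq_getElem a 0 hlt
      have htake : (a.take (m+1)).sum = (a.take m).sum + a[m] := by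
        rw [List.take_add_one, List.sum_append, List.getElem?_eq_getElem hlt]
        simp
      by_cases hmi : (m : Int) ≤ i
      · have h1 : (min (i+1) ((m:Int))).toNat = m := by omega
        have h2 : (min (i+1) ((m:Int)+1)).toNat = m + 1 := by omega
        simp [if_pos hmi, hget, h1]
        have h3 : (min i (m:Int) + 1).toNat = m + 1 := by omega
        rw [h3, htake]
      · simp [if_neg hmi]
        have h3 : (min (i+1) (m:Int)).toNat = (min i (m:Int) + 1).toNat := by omega
        rw [h3]

theorem convert_spec_aux (a : List Int) :
    convert_to_multidimensional a = convert_to_multidimensional_alt a := by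
  unfold convert_to_multidimensional convert_to_multidimensional_alt
  dsimp only
  rw [pv_prefix_fold_spec a [] 0]
  rw [PySem.List.foldl_append_singleton_eq_map]
  apply List.map_congr_left
  intro i hi
  rw [PySem.List.mem_pyRange_one] at hi
  have hlen : ((a.length : Nat) : Int) = (a.length : Int) := rfl
  rw [← hlen, pv_inner_loop_spec a i a.length (le_refl _)]
  apply List.map_congr_left
  intro j hj
  rw [PySem.List.mem_pyRange_one] at hj
  -- show the accumulated sum equals the prefix-table lookup
  have hk : min i j = (((min i j).toNat : Nat) : Int) := by omega
  have hklt : (min i j).toNat < a.length := by omega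
  rw [hk, PySem.List.pyGetD_natCast]
  rw [List.nil_append, List.getD_eq_getElem?_getD]
  rw [List.getElem?_map, List.getElem?_range hklt]
  have h2 : (min i j + 1).toNat = (min i j).toNat + 1 := by omega
  simp [h2]

-- ===== VERDICT (by name: the statement is the Claim_ definition above) =====
theorem convert_to_multidimensional_spec : Claim_equal_convert_to_multidimensional := by
  intro a _
  unfold Spec_convert_to_multidimensional
  exact convert_spec_aux a
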